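-- pv_equiv track=rewrite | github.com/pengyuanzhi/loongarch64 | loongarch64/fix_code_style.py | fix_function_spacing
-- ===== SOURCE A (Python) =====
-- def fix_function_spacing(content):
--     """修复函数之间的空行"""
--     # 在函数的 } 和下一个函数的 /** 之间添加空行
--     # 这种模式：}    /**  -> }\n\n    /**
--     lines = content.split('\n')
--     result = []
--     i = 0
--
--     while i < len(lines):
--         result.append(lines[i])
--
--         # 如果当前行是函数结束的 }
--         if lines[i].strip() == '}':
--             # 检查下一行是否是 /** 或空白
--             if i + 1 < len(lines):
--                 next_line = lines[i + 1].strip()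
--                 # 如果下一行是 /** 且中间没有空行
--                 if next_line.startswith('/**'):
--                     # 检查中间是否有空行
--                     has_empty = False
--                     j = i + 1
--                     while j < len(lines) and lines[j].strip() == '':
--                         has_empty = True
--                         j += 1
--
--                     if not has_empty:
--                         result.append('')  # 添加空行
--
--         i += 1
--
--     return '\n'.join(result)
-- ===== SOURCE B (Python) =====
-- def fix_function_spacing(content):
--     """修复函数之间的空行 — single reverse scan carrying the following line, output built back-to-front."""
--     out = []
--     nxt = None
--     for cur in reversed(content.split('\n')):
--         if nxt is not None and cur.strip() == '}' and nxt.strip().startswith('/**'):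
--             out.append('')
--         out.append(cur)
--         nxt = cur
--     return '\n'.join(reversed(out))
-- ===== Notes on version B (the rewrite author's own statement) =====
-- stated objective: simpler
-- what changed: Replaces the index walk with its lookahead re-scan and dead inner empty-line loop by a single reverse traversal that carries the following line and builds the output back-to-front.
import Mathlib
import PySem

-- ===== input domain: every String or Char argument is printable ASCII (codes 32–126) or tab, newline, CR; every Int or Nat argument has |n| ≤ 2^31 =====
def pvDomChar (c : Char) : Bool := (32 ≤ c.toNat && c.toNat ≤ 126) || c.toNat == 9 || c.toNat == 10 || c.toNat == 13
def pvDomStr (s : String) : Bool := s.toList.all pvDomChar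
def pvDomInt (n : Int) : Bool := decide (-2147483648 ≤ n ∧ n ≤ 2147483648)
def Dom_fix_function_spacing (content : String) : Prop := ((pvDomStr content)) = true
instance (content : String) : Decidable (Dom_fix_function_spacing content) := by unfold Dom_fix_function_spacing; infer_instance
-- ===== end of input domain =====

-- B rewrites A's forward index walk (with its dead empty-line re-scan) as one reverse
-- traversal carrying the following line, building the output back-to-front (objective: simpler).

-- ===== PORT A =====
-- inner `while j < len(lines) and lines[j].strip() == ''` loop of A
def pvInnerLoop (lines : List String) (j : Nat) (has_empty : Bool) : Bool :=
  if h : j < lines.length then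
    if PySem.Str.strip lines[j] == "" then
      pvInnerLoop lines (j + 1) true
    else has_empty
  else has_empty
termination_by lines.length - j

-- outer `while i < len(lines)` loop of A, state (i, result)
def pvALoop (lines : List String) (i : Nat) (result : List String) : List String :=
  if h : i < lines.length then
    let result := result ++ [lines[i]]
    let result :=
      if PySem.Str.strip lines[i] == "}" then
        if h2 : i + 1 < lines.length then
          let next_line := PySem.Str.strip lines[i + 1]
          if PySem.Str.startswith next_line "/**" then
            let has_empty := pvInnerLoop lines (i + 1) false
            if !has_empty then result ++ [""] else result
          else result
        else result
      else result
    pvALoop lines (i + 1) result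
  else result
termination_by lines.length - i

def fix_function_spacing (content : String) : String :=
  let lines := (PySem.Str.split? content "\n").getD []
  PySem.Str.join "\n" (pvALoop lines 0 [])

-- ===== PORT B =====
-- body of B's `for cur in reversed(lines)` loop; state (out, nxt)
def pvBStep (st : List String × Option String) (cur : String) : List String × Option String :=
  let out :=
    match st.2 with
    | some nxt =>
        if PySem.Str.strip cur == "}" && PySem.Str.startswith (PySem.Str.strip nxt) "/**" then
          st.1 ++ [""]
        else st.1
    | none => st.1
  (out ++ [cur], some cur)

def fix_function_spacing_alt (content : String) : String :=
  let lines := (PySem.Str.split? content "\n").getD []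
  let st := lines.reverse.foldl pvBStep ([], none)
  PySem.Str.join "\n" st.1.reverse

-- ===== PRECONDITION & SPEC =====
def Spec_fix_function_spacing (content : String) (out : String) : Prop := out = fix_function_spacing_alt content
instance (content : String) (out : String) : Decidable (Spec_fix_function_spacing content out) := by unfold Spec_fix_function_spacing; infer_instance

-- ===== CLAIM (what is proved, stated in full; the proofs are below) =====
def Claim_equal_fix_function_spacing : Prop := ∀ (content : String), Dom_fix_function_spacing content → Spec_fix_function_spacing content (fix_function_spacing content)

-- ===== LEMMAS AND PROOFS =====

-- canonical insertion pass both ports are reduced to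
def pvIns : List String → List String
  | [] => []
  | [x] => [x]
  | x :: y :: r =>
      if PySem.Str.strip x == "}" && PySem.Str.startswith (PySem.Str.strip y) "/**" then
        x :: "" :: pvIns (y :: r)
      else x :: pvIns (y :: r)

theorem pvInner_false (lines : List String) (i : Nat) (h : i < lines.length)
    (hs : PySem.Str.startswith (PySem.Str.strip lines[i]) "/**" = true) :
    pvInnerLoop lines i false = false := by
  unfold pvInnerLoop
  rw [dif_pos h, if_neg]
  intro hemp
  simp only [beq_iff_eq] at hemp
  rw [hemp] at hs
  exact absurd hs (by decide)

theorem pvALoop_eq (lines : List String) (n i : Nat) (hn : lines.length - i = n) (res : List String) :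
    pvALoop lines i res = res ++ pvIns (lines.drop i) := by
  induction n generalizing i res with
  | zero =>
      have hle : lines.length ≤ i := by omega
      rw [pvALoop, dif_neg (by omega), List.drop_of_length_le hle]
      simp [pvIns]
  | succ m ih =>
      have h : i < lines.length := by omega
      rw [pvALoop, dif_pos h]
      simp only []
      rw [ih (i + 1) (by omega), List.drop_eq_getElem_cons h]
      by_cases h2 : i + 1 < lines.length
      · rw [List.drop_eq_getElem_cons h2]
        by_cases hb : (PySem.Str.strip lines[i] == "}") = true
        · by_cases hsw : PySem.Str.startswith (PySem.Str.strip lines[i + 1]) "/**" = true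
          · rw [dif_pos h2, if_pos hb, if_pos hsw, pvInner_false lines (i + 1) h2 hsw]
            simp only [PySem.Str.startswith_eq, PySem.Str.toList_strip] at hsw
            have hsw' : PySem.Chars.startswith (PySem.Chars.strip lines[i + 1].toList) ['/', '*', '*'] = true := hsw
            simp [pvIns, hb, hsw']
          · rw [dif_pos h2, if_pos hb, if_neg hsw]
            simp only [PySem.Str.startswith_eq, PySem.Str.toList_strip, Bool.not_eq_true] at hsw
            have hsw' : PySem.Chars.startswith (PySem.Chars.strip lines[i + 1].toList) ['/', '*', '*'] = false := hsw
            simp [pvIns, hb, hsw']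
        · rw [if_neg hb]
          simp [pvIns, hb]
      · have hd : lines.drop (i + 1) = [] := List.drop_of_length_le (by omega)
        rw [dif_neg h2, hd]
        split <;> simp [pvIns]

theorem pvB_eq (l : List String) :
    l.reverse.foldl pvBStep ([], none) = ((pvIns l).reverse, l.head?) := by
  induction l with
  | nil => rfl
  | cons x t ih =>
      rw [List.reverse_cons, List.foldl_append, ih]
      cases t with
      | nil => rfl
      | cons y r =>
          simp only [pvIns, List.head?]
          split <;> rename_i hc <;> simp at hc <;> simp [pvBStep, hc]; exact hc

-- ===== VERDICT (by name: the statement is the Claim_ definition above) =====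
theorem fix_function_spacing_spec : Claim_equal_fix_function_spacing := by
  intro content _
  unfold Spec_fix_function_spacing fix_function_spacing fix_function_spacing_alt
  simp only [pvB_eq, pvALoop_eq _ _ 0 rfl]
  simp
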